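-- pv_equiv track=rewrite | github.com/yeahzizi/algorithm | 프로그래머스/level 3/PR. level3. 최고의 집합.py | solution
-- ===== SOURCE A (Python) =====
-- def solution(n, s):
--     answer = []
--     if n > s:
--         return [-1]
--
--     if s % n == 0:
--         for i in range(n):
--             answer.append(s // n)
--         return answer
--     else:
--         now = s % n
--         for i in range(n):
--             if now == 0:
--                 answer.append(s // n)
--             else:
--                 answer.append((s // n) + 1)
--                 now -= 1
--     answer.sort()
--
--     return answer
-- ===== SOURCE B (Python) =====
-- def solution(n, s):
--     if n > s:
--         return [-1]
--     return [(s + i) // n for i in range(n)]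
-- ===== Notes on version B (the rewrite author's own statement) =====
-- stated objective: alternative
-- what changed: B computes each element directly by the per-index identity answer[i] = (s+i)//n (already ascending), replacing A's quotient/remainder countdown loop plus final sort with a single floor-division formula per position.
import Mathlib
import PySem

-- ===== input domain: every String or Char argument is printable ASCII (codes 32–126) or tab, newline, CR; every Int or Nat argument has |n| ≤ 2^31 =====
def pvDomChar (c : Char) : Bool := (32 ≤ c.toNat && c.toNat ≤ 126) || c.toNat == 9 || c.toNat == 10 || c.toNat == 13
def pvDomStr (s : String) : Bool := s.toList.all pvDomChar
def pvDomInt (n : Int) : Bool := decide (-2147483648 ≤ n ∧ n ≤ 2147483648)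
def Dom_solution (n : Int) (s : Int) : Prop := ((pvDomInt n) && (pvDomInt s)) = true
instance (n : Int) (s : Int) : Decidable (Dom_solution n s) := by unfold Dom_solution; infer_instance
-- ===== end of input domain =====

-- B replaces A's countdown loop + final sort by the per-index formula answer[i] = (s+i)//n,
-- already ascending; objective: alternative (no quotient/remainder split, no sort).


-- ===== PORT A =====
def solution (n : Int) (s : Int) : List Int :=
  if n > s then [-1]
  else if PySem.Int.mod s n == 0 then
    (PySem.List.pyRange 0 n 1).foldl (fun acc _ => acc ++ [PySem.Int.floordiv s n]) []
  else
    let st := (PySem.List.pyRange 0 n 1).foldl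
      (fun (st : List Int × Int) _ =>
        if st.2 == 0 then (st.1 ++ [PySem.Int.floordiv s n], st.2)
        else (st.1 ++ [PySem.Int.floordiv s n + 1], st.2 - 1))
      ([], PySem.Int.mod s n)
    PySem.List.sorted st.1 (fun x => x) false

-- ===== PORT B =====
def solution_alt (n : Int) (s : Int) : List Int :=
  if n > s then [-1]
  else (PySem.List.pyRange 0 n 1).map (fun i => PySem.Int.floordiv (s + i) n)

-- ===== PRECONDITION & SPEC =====
-- Pre_ excludes only n = 0 with n ≤ s, exactly where the Python A (and B) raise
-- ZeroDivisionError on 's % n' / '//' (with n = 0 > s both return [-1] before dividing).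
def Pre_solution (n : Int) (s : Int) : Prop := n ≠ 0 ∨ s < n
instance (n : Int) (s : Int) : Decidable (Pre_solution n s) := by unfold Pre_solution; infer_instance
def pvWitness_solution : Int × Int := (3, 11)
def Spec_solution (n : Int) (s : Int) (out : List Int) : Prop := out = solution_alt n s
instance (n : Int) (s : Int) (out : List Int) : Decidable (Spec_solution n s out) := by unfold Spec_solution; infer_instance

-- ===== CLAIM (what is proved, stated in full; the proofs are below) =====
def Claim_equal_solution : Prop := ∀ (n : Int) (s : Int), Dom_solution n s → Pre_solution n s → Spec_solution n s (solution n s)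

-- ===== LEMMAS AND PROOFS =====

-- A's second loop, characterised: only the LENGTH of the list driven over matters; with a
-- nonnegative countdown `now` it emits min(now, len) copies of q+1 then the rest copies of q.
lemma loop_char (q : Int) (l : List Int) : ∀ (acc : List Int) (now : Int), 0 ≤ now →
    (l.foldl (fun (st : List Int × Int) _ =>
        if st.2 == 0 then (st.1 ++ [q], st.2)
        else (st.1 ++ [q + 1], st.2 - 1)) (acc, now)).1
    = acc ++ List.replicate (min now.toNat l.length) (q + 1)
          ++ List.replicate (l.length - now.toNat) q := by
  induction l with
  | nil => intro acc now _; simp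
  | cons x t ih =>
    intro acc now hnow
    by_cases h0 : now = 0
    · subst h0
      simp only [List.foldl_cons]
      rw [if_pos (show ((0:Int) == 0) = true by decide), ih (acc ++ [q]) 0 le_rfl]
      simp [List.replicate_succ]
    · have hpos : 0 < now := lt_of_le_of_ne hnow (Ne.symm h0)
      simp only [List.foldl_cons]
      rw [if_neg (by simpa using h0), ih (acc ++ [q + 1]) (now - 1) (by omega)]
      have h1 : now.toNat = (now - 1).toNat + 1 := by omega
      have h2 : min now.toNat (t.length + 1) = min (now - 1).toNat t.length + 1 := by omega
      have h3 : t.length + 1 - now.toNat = t.length - (now - 1).toNat := by omega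
      simp only [List.length_cons, h2, h3, List.replicate_succ, List.append_assoc,
        List.cons_append, List.nil_append]

lemma sorted_two_blocks (q : Int) (a b : Nat) :
    PySem.List.sorted (List.replicate a (q + 1) ++ List.replicate b q) (fun x => x) false
    = List.replicate b q ++ List.replicate a (q + 1) := by
  apply PySem.List.eq_of_perm_of_pairwise_le_of_injective (fun x : Int => x)
    (fun _ _ h => h)
  · exact (PySem.List.sorted_perm _ _ _).trans (List.perm_append_comm)
  · exact PySem.List.sorted_pairwise _ _
  · refine List.pairwise_append.mpr ⟨List.pairwise_replicate.mpr (Or.inr le_rfl),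
      List.pairwise_replicate.mpr (Or.inr le_rfl), ?_⟩
    intro x hx y hy
    rw [List.eq_of_mem_replicate hx, List.eq_of_mem_replicate hy]; omega

-- B's per-index formula, characterised: for n > 0 the map over range(n) IS the two-block list
-- (n-r) copies of q then r copies of q+1, where q = s//n, r = s%n.
lemma map_formula_blocks (n s : Int) (hn : 0 < n) :
    (PySem.List.pyRange 0 n 1).map (fun i => PySem.Int.floordiv (s + i) n)
    = List.replicate (n - PySem.Int.mod s n).toNat (PySem.Int.floordiv s n)
      ++ List.replicate (PySem.Int.mod s n).toNat (PySem.Int.floordiv s n + 1) := by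
  set q := PySem.Int.floordiv s n with hq
  set r := PySem.Int.mod s n with hr
  have hs : q * n + r = s := PySem.Int.floordiv_mul_add_mod s n
  have hr0 : 0 ≤ r := PySem.Int.mod_nonneg s hn
  have hrn : r < n := PySem.Int.mod_lt s hn
  apply List.ext_getElem
  · simp [PySem.List.length_pyRange_one]; omega
  · intro i h1 h2
    rw [List.getElem_map, PySem.List.getElem_pyRange_one]
    rw [List.getElem_append]
    have hlen : i < n.toNat := by
      simpa [PySem.List.length_pyRange_one] using h1
    split_ifs with hcase
    · rw [List.getElem_replicate]
      rw [PySem.Int.floordiv_eq_iff_of_pos hn]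
      have : ((i : Int)) < n - r := by
        simp only [List.length_replicate] at hcase; omega
      constructor
      · nlinarith [hs]
      · nlinarith [hs]
    · rw [List.getElem_replicate]
      rw [PySem.Int.floordiv_eq_iff_of_pos hn]
      have : n - r ≤ ((i : Int)) := by
        simp only [List.length_replicate] at hcase; omega
      have hin : ((i : Int)) < n := by omega
      constructor
      · nlinarith [hs]
      · nlinarith [hs]

-- ===== VERDICT (by name: the statement is the Claim_ definition above) =====
theorem solution_spec : Claim_equal_solution := by
  intro n s _ hn
  unfold Spec_solution solution solution_alt
  by_cases hns : n > s
  · simp [hns]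
  · simp only [if_neg hns]
    set q := PySem.Int.floordiv s n with hq
    set r := PySem.Int.mod s n with hr
    rcases lt_trichotomy n 0 with hneg | hz | hpos
    · -- n < 0: the range is empty; both sides are []
      have hl : PySem.List.pyRange 0 n 1 = [] := PySem.List.pyRange_one_eq_nil (by omega)
      rw [hl]
      simp [PySem.List.sorted]
    · exact absurd hz (hn.elim id (fun h => by omega))
    · -- n > 0
      rw [map_formula_blocks n s hpos, ← hq, ← hr]
      have hrn : r < n := PySem.Int.mod_lt s hpos
      by_cases hr0 : r = 0
      · simp only [hr0, beq_self_eq_true, if_pos]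
        rw [PySem.List.foldl_append_singleton_eq_map, List.map_const',
          PySem.List.length_pyRange_one]
        simp
      · rw [if_neg (by simpa using hr0)]
        have hrpos : 0 < r := lt_of_le_of_ne (PySem.Int.mod_nonneg s hpos) (Ne.symm hr0)
        rw [loop_char q (PySem.List.pyRange 0 n 1) [] r (le_of_lt hrpos)]
        rw [PySem.List.length_pyRange_one]
        have hmin : min r.toNat (n - 0).toNat = r.toNat := by omega
        rw [hmin, List.nil_append, sorted_two_blocks]
        congr 1
        congr 1
        omega
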